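-- pv_equiv track=rewrite | github.com/TheDarkLightX/Formal_Methods_Philosophy | experiments/math_object_innovation_v34/run_cycle.py | minimal_depth_for_block
-- ===== SOURCE A (Python) =====
-- from collections import Counter, defaultdict
--
-- def minimal_depth_for_block(items, order):
--     for depth in range(0, 6):
--         buckets = defaultdict(set)
--         for item, vector in items:
--             prefix = tuple(bit for bit in order if vector[bit])[:depth]
--             buckets[prefix].add(item["first_refuter"])
--         if all(len(labels) == 1 for labels in buckets.values()):
--             return depth, len(buckets)
--     return None, None
-- ===== SOURCE B (Python) =====
-- def minimal_depth_for_block(items, order):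
--     # Precompute each item's filtered bit-sequence and label once, then refine a
--     # partition depth by depth instead of re-bucketing all items at every depth.
--     seqs = [([bit for bit in order if vector[bit]], item["first_refuter"])
--             for item, vector in items]
--     groups = [seqs] if seqs else []
--     for depth in range(6):
--         if all(len({label for _, label in g}) == 1 for g in groups):
--             return depth, len(groups)
--         new_groups = []
--         for g in groups:
--             buckets = {}
--             for s, label in g:
--                 key = s[depth] if depth < len(s) else None
--                 buckets.setdefault(key, []).append((s, label))
--             new_groups.extend(buckets.values())
--         groups = new_groups
--     return None, None
-- ===== Notes on version B (the rewrite author's own statement) =====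
-- stated objective: alternative
-- what changed: B precomputes each item's filtered bit-sequence and label once, then refines a partition of the items depth by depth (splitting groups by the next bit), instead of re-filtering every item and re-bucketing all items into a fresh dict of full prefixes at every depth.
import Mathlib
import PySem

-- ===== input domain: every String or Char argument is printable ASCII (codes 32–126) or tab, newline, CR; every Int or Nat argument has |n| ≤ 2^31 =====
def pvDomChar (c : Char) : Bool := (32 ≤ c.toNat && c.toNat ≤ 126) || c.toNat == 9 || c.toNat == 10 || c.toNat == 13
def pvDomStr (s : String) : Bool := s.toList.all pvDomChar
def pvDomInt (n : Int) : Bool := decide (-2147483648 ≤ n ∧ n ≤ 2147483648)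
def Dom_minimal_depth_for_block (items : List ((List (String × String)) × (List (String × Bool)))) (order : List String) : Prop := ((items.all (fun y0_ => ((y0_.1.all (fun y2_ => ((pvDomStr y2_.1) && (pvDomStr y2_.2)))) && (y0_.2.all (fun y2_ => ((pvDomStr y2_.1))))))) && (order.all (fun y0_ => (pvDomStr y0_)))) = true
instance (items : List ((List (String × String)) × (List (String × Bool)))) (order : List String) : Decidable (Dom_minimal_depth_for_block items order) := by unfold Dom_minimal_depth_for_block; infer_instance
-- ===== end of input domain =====

-- B precomputes each item's filtered bit-sequence once and refines a partition depth by depth,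
-- instead of A's re-filtering and re-bucketing of all items into a dict of full prefixes at every depth.

-- ===== PORT A =====
-- shared lookup helpers for Python's `vector[bit]` and `item["first_refuter"]`: under
-- Pre_minimal_depth_for_block the key is always present, so the `getD` default is never read
-- (Python raises KeyError exactly on the inputs Pre_ excludes).
def pvVecGet (vec : List (String × Bool)) (bit : String) : Bool :=
  (PySem.Dict.mk vec).getD bit false

def pvLabel (item : List (String × String)) : String :=
  (PySem.Dict.mk item).getD "first_refuter" ""

-- `tuple(bit for bit in order if vector[bit])`
def pvFiltered (order : List String) (vec : List (String × Bool)) : List String :=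
  order.filter (fun bit => pvVecGet vec bit)

-- the inner `for item, vector in items` loop filling `buckets` (defaultdict(set))
def pvBucketsA (items : List ((List (String × String)) × (List (String × Bool))))
    (order : List String) (depth : Nat) : PySem.Dict (List String) (PySem.Set String) :=
  items.foldl
    (fun bk p =>
      bk.modify ((pvFiltered order p.2).take depth) PySem.Set.empty
        (fun s => PySem.Set.add s (pvLabel p.1)))
    PySem.Dict.empty

-- `for depth in range(0, 6): ... return None, None`
def pvLoopA (items : List ((List (String × String)) × (List (String × Bool))))
    (order : List String) : List Nat → Option Int × Option Int
  | [] => (none, none)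
  | depth :: rest =>
    let buckets := pvBucketsA items order depth
    if buckets.values.all (fun labels => labels.length == 1) then
      (some (depth : Int), some (buckets.size : Int))
    else pvLoopA items order rest

def minimal_depth_for_block (items : List ((List (String × String)) × (List (String × Bool)))) (order : List String) : Option Int × Option Int :=
  pvLoopA items order (List.range 6)

-- ===== PORT B =====
-- `seqs = [([bit for bit in order if vector[bit]], item["first_refuter"]) for item, vector in items]`
def pvSeqs (items : List ((List (String × String)) × (List (String × Bool))))
    (order : List String) : List (List String × String) :=
  items.map (fun p => (pvFiltered order p.2, pvLabel p.1))

-- one refinement step: split every group by `s[depth] if depth < len(s) else None`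
def pvSplit (depth : Nat) (groups : List (List (List String × String))) :
    List (List (List String × String)) :=
  groups.foldl
    (fun newGroups g =>
      newGroups ++
        (g.foldl
          (fun bk x => bk.modify x.1[depth]? [] (fun l => l ++ [x]))
          (PySem.Dict.empty : PySem.Dict (Option String) (List (List String × String)))).values)
    []

-- `for depth in range(6): ...`
def pvLoopB : List Nat → List (List (List String × String)) → Option Int × Option Int
  | [], _ => (none, none)
  | depth :: rest, groups =>
    if groups.all (fun g => (PySem.Set.ofList (g.map (·.2))).length == 1) then
      (some (depth : Int), some (groups.length : Int))
    else pvLoopB rest (pvSplit depth groups)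

def minimal_depth_for_block_alt (items : List ((List (String × String)) × (List (String × Bool)))) (order : List String) : Option Int × Option Int :=
  let seqs := pvSeqs items order
  pvLoopB (List.range 6) (if seqs.isEmpty then [] else [seqs])

-- ===== PRECONDITION & SPEC =====
-- Pre_ excludes exactly the inputs where the Python A raises KeyError: an item dict without
-- the "first_refuter" key, or a vector dict missing some bit of `order` (B raises there too).
def Pre_minimal_depth_for_block (items : List ((List (String × String)) × (List (String × Bool)))) (order : List String) : Prop :=
  ∀ p ∈ items, ("first_refuter" ∈ p.1.map Prod.fst) ∧ ∀ bit ∈ order, bit ∈ p.2.map Prod.fst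
instance (items : List ((List (String × String)) × (List (String × Bool)))) (order : List String) : Decidable (Pre_minimal_depth_for_block items order) := by unfold Pre_minimal_depth_for_block; infer_instance

def pvWitness_minimal_depth_for_block : (List ((List (String × String)) × (List (String × Bool)))) × List String :=
  ([([("first_refuter", "x")], [("b", true)])], ["b"])

def Spec_minimal_depth_for_block (items : List ((List (String × String)) × (List (String × Bool)))) (order : List String) (out : Option Int × Option Int) : Prop := out = minimal_depth_for_block_alt items order
instance (items : List ((List (String × String)) × (List (String × Bool)))) (order : List String) (out : Option Int × Option Int) : Decidable (Spec_minimal_depth_for_block items order out) := by unfold Spec_minimal_depth_for_block; infer_instance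

-- ===== CLAIM (what is proved, stated in full; the proofs are below) =====
def Claim_equal_minimal_depth_for_block : Prop := ∀ (items : List ((List (String × String)) × (List (String × Bool)))) (order : List String), Dom_minimal_depth_for_block items order → Pre_minimal_depth_for_block items order → Spec_minimal_depth_for_block items order (minimal_depth_for_block items order)

-- ===== LEMMAS AND PROOFS =====

-- all-labels-equal homogeneity of S at a given prefix depth: the condition both loops test
def pvHom (depth : Nat) (S : List (List String × String)) : Prop :=
  ∀ x ∈ S, ∀ y ∈ S, x.1.take depth = y.1.take depth → x.2 = y.2

-- the partition invariant maintained by B's groups at a given depth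
def pvInv (depth : Nat) (S : List (List String × String))
    (groups : List (List (List String × String))) : Prop :=
  (∀ g ∈ groups, g ≠ []) ∧
  (∀ g ∈ groups, ∀ x ∈ g, ∀ y ∈ g, x.1.take depth = y.1.take depth) ∧
  List.Pairwise (fun g h => ∀ x ∈ g, ∀ y ∈ h, x.1.take depth ≠ y.1.take depth) groups ∧
  groups.flatten.Perm S


-- generic grouping fold: value stored at key c is the fold of `upd` over the items with key c
theorem pvGetD_groupFold {κ α ν : Type} [BEq κ] [LawfulBEq κ] [DecidableEq κ]
    (key : α → κ) (upd : ν → α → ν) (v0 : ν) (l : List α) (d : PySem.Dict κ ν) (c : κ) :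
    (l.foldl (fun bk x => bk.modify (key x) v0 (fun v => upd v x)) d).getD c v0
      = (l.filter (fun x => key x == c)).foldl upd (d.getD c v0) := by
  induction l generalizing d with
  | nil => rfl
  | cons a l ih =>
    simp only [List.foldl_cons, List.filter_cons]
    rw [ih]
    by_cases h : key a = c
    · simp [h]
    · simp only [beq_eq_false_iff_ne.mpr h, Bool.false_eq_true, if_false,
        PySem.Dict.getD_modify, if_neg (fun hc : c = key a => h hc.symm)]

-- a Python set has exactly one element iff the list it was built from is nonempty and constant
theorem pvSetLenOne {α : Type} [BEq α] [LawfulBEq α] (l : List α) :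
    ((PySem.Set.ofList l).length == 1) = true ↔ l ≠ [] ∧ ∀ x ∈ l, ∀ y ∈ l, x = y := by
  rw [beq_iff_eq, List.length_eq_one_iff]
  constructor
  · rintro ⟨a, ha⟩
    have hm : ∀ x ∈ l, x = a := by
      intro x hx
      have : x ∈ PySem.Set.ofList l := (PySem.Set.mem_ofList l x).mpr hx
      rw [ha] at this; simpa using this
    have hne : l ≠ [] := by
      intro h; rw [h] at ha; simp [PySem.Set.ofList] at ha
    exact ⟨hne, fun x hx y hy => (hm x hx).trans (hm y hy).symm⟩
  · rintro ⟨hne, hall⟩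
    obtain ⟨z, t, rfl⟩ := List.exists_cons_of_ne_nil hne
    refine ⟨z, ?_⟩
    rw [PySem.Set.ofList_cons]
    have hd : PySem.Set.discard (PySem.Set.ofList t) z = [] := by
      rw [List.eq_nil_iff_forall_not_mem]
      intro x hx
      have := (PySem.Set.mem_discard (PySem.Set.ofList t) z x).mp hx
      exact this.2 (hall x (by simp [(PySem.Set.mem_ofList t x).mp this.1]) z (by simp))
    rw [hd]

-- two lists agree on their (d+1)-prefix iff they agree on the d-prefix and the d-th entry
theorem pvTakeSuccIff (l m : List String) (d : Nat) :
    l.take (d + 1) = m.take (d + 1) ↔ (l.take d = m.take d ∧ l[d]? = m[d]?) := by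
  constructor
  · intro h
    constructor
    · have := congrArg (fun t => List.take d t) h
      simpa [List.take_take] using this
    · have h1 := congrArg (fun t => t[d]?) h
      simpa [List.getElem?_take_of_lt (Nat.lt_succ_self d)] using h1
  · rintro ⟨h1, h2⟩
    rw [List.take_add_one, List.take_add_one, h1, h2]

theorem pvHeadDMem {α : Type} (l : List α) (a : α) (h : l ≠ []) : l.headD a ∈ l := by
  cases l with
  | nil => exact absurd rfl h
  | cons b t => exact List.mem_cons_self

-- A's bucket fold over `items` is the same fold over the precomputed sequence/label pairs
theorem pvBucketsA_eq_fold (items : List ((List (String × String)) × (List (String × Bool))))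
    (order : List String) (depth : Nat) :
    pvBucketsA items order depth
      = (pvSeqs items order).foldl
          (fun bk x => bk.modify (x.1.take depth) PySem.Set.empty (fun s => PySem.Set.add s x.2))
          PySem.Dict.empty := by
  unfold pvBucketsA pvSeqs
  rw [List.foldl_map]

theorem pvAKeys (S : List (List String × String)) (depth : Nat) :
    ((S.foldl (fun bk x => bk.modify (x.1.take depth) PySem.Set.empty (fun s => PySem.Set.add s x.2)) PySem.Dict.empty : PySem.Dict (List String) (PySem.Set String))).keys
      = PySem.Set.ofList (S.map (fun x => x.1.take depth)) := by
  rw [PySem.Dict.keys_foldl_modify_key]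
  simp [PySem.Set.update_nil_left]

theorem pvANodup (S : List (List String × String)) (depth : Nat) :
    ((S.foldl (fun bk x => bk.modify (x.1.take depth) PySem.Set.empty (fun s => PySem.Set.add s x.2)) PySem.Dict.empty : PySem.Dict (List String) (PySem.Set String))).keys.Nodup := by
  apply PySem.Dict.nodup_keys_foldl_modify_key
  simp

theorem pvAGetD (S : List (List String × String)) (depth : Nat) (c : List String) :
    ((S.foldl (fun bk x => bk.modify (x.1.take depth) PySem.Set.empty (fun s => PySem.Set.add s x.2)) PySem.Dict.empty : PySem.Dict (List String) (PySem.Set String))).getD c PySem.Set.empty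
      = PySem.Set.ofList ((S.filter (fun x => x.1.take depth == c)).map (fun x => x.2)) := by
  have h := pvGetD_groupFold (fun x : List String × String => x.1.take depth)
    (fun s x => PySem.Set.add s x.2) PySem.Set.empty S PySem.Dict.empty c
  rw [h, PySem.Dict.getD_empty, ← PySem.Set.update_map_eq_foldl_add]
  exact PySem.Set.update_nil_left _

theorem pvCondA_iff (S : List (List String × String)) (depth : Nat) :
    ((S.foldl (fun bk x => bk.modify (x.1.take depth) PySem.Set.empty (fun s => PySem.Set.add s x.2)) PySem.Dict.empty : PySem.Dict (List String) (PySem.Set String)).values.all (fun labels => labels.length == 1)) = true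
      ↔ pvHom depth S := by
  rw [PySem.Dict.values_eq_map_keys _ (pvANodup S depth) PySem.Set.empty, pvAKeys, List.all_eq_true]
  constructor
  · intro hall x hx y hy hxy
    have hc : x.1.take depth ∈ PySem.Set.ofList (S.map (fun x => x.1.take depth)) :=
      (PySem.Set.mem_ofList _ _).mpr (List.mem_map.mpr ⟨x, hx, rfl⟩)
    have := hall _ (List.mem_map.mpr ⟨x.1.take depth, hc, rfl⟩)
    rw [pvAGetD] at this
    have hone := (pvSetLenOne _).mp this
    refine hone.2 x.2 ?_ y.2 ?_
    · exact List.mem_map.mpr ⟨x, List.mem_filter.mpr ⟨hx, beq_self_eq_true _⟩, rfl⟩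
    · exact List.mem_map.mpr ⟨y, List.mem_filter.mpr ⟨hy, beq_iff_eq.mpr hxy.symm⟩, rfl⟩
  · intro hhom v hv
    obtain ⟨c, hc, rfl⟩ := List.mem_map.mp hv
    obtain ⟨x, hx, hxc⟩ := List.mem_map.mp ((PySem.Set.mem_ofList _ _).mp hc)
    rw [pvAGetD]
    apply (pvSetLenOne _).mpr
    constructor
    · exact List.ne_nil_of_mem (List.mem_map.mpr ⟨x, List.mem_filter.mpr ⟨hx, beq_iff_eq.mpr hxc⟩, rfl⟩)
    · intro a ha b hb
      obtain ⟨xa, hxa, rfl⟩ := List.mem_map.mp ha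
      obtain ⟨xb, hxb, rfl⟩ := List.mem_map.mp hb
      have hma := List.mem_filter.mp hxa
      have hmb := List.mem_filter.mp hxb
      exact hhom xa hma.1 xb hmb.1 ((beq_iff_eq.mp hma.2).trans (beq_iff_eq.mp hmb.2).symm)

theorem pvSizeA (S : List (List String × String)) (depth : Nat) :
    (S.foldl (fun bk x => bk.modify (x.1.take depth) PySem.Set.empty (fun s => PySem.Set.add s x.2)) PySem.Dict.empty : PySem.Dict (List String) (PySem.Set String)).size
      = (PySem.Set.ofList (S.map (fun x => x.1.take depth))).length := by
  have h := congrArg List.length (pvAKeys S depth)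
  simpa [PySem.Dict.keys, PySem.Dict.size] using h

-- ===== B-side characterizations =====
theorem pvBKeys (g : List (List String × String)) (depth : Nat) :
    (g.foldl (fun bk x => bk.modify x.1[depth]? [] (fun l => l ++ [x])) (PySem.Dict.empty : PySem.Dict (Option String) (List (List String × String)))).keys
      = PySem.Set.ofList (g.map (fun x => x.1[depth]?)) := by
  rw [PySem.Dict.keys_foldl_modify_key]
  simp [PySem.Set.update_nil_left]

theorem pvBNodup (g : List (List String × String)) (depth : Nat) :
    (g.foldl (fun bk x => bk.modify x.1[depth]? [] (fun l => l ++ [x])) (PySem.Dict.empty : PySem.Dict (Option String) (List (List String × String)))).keys.Nodup := by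
  apply PySem.Dict.nodup_keys_foldl_modify_key
  simp

theorem pvBGetD (g : List (List String × String)) (depth : Nat) (c : Option String) :
    (g.foldl (fun bk x => bk.modify x.1[depth]? [] (fun l => l ++ [x])) (PySem.Dict.empty : PySem.Dict (Option String) (List (List String × String)))).getD c []
      = g.filter (fun x => x.1[depth]? == c) := by
  have h := pvGetD_groupFold (fun x : List String × String => x.1[depth]?)
    (fun l x => l ++ [x]) ([] : List (List String × String)) g PySem.Dict.empty c
  rw [h, PySem.Dict.getD_empty, PySem.List.foldl_append_singleton_eq_self, List.nil_append]

theorem pvBValues (g : List (List String × String)) (depth : Nat) :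
    (g.foldl (fun bk x => bk.modify x.1[depth]? [] (fun l => l ++ [x])) (PySem.Dict.empty : PySem.Dict (Option String) (List (List String × String)))).values
      = (PySem.Set.ofList (g.map (fun x => x.1[depth]?))).map (fun c => g.filter (fun x => x.1[depth]? == c)) := by
  rw [PySem.Dict.values_eq_map_keys _ (pvBNodup g depth) [], pvBKeys]
  exact List.map_congr_left (fun c _ => pvBGetD g depth c)

theorem pvSplit_eq (depth : Nat) (groups : List (List (List String × String))) :
    pvSplit depth groups
      = groups.flatMap (fun g => (PySem.Set.ofList (g.map (fun x => x.1[depth]?))).map (fun c => g.filter (fun x => x.1[depth]? == c))) := by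
  unfold pvSplit
  rw [PySem.List.foldl_append_eq_flatMap]
  rw [List.nil_append]
  exact List.flatMap_congr (fun g _ => pvBValues g depth)

theorem pvCondB_iff (S : List (List String × String)) (depth : Nat)
    (groups : List (List (List String × String))) (h : pvInv depth S groups) :
    (groups.all (fun g => (PySem.Set.ofList (g.map (·.2))).length == 1)) = true ↔ pvHom depth S := by
  obtain ⟨hne, hwithin, hpair, hperm⟩ := h
  rw [List.all_eq_true]
  constructor
  · intro hall x hx y hy hxy
    obtain ⟨g, hg, hxg⟩ := List.mem_flatten.mp (hperm.symm.subset (by exact hx))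
    obtain ⟨g', hg', hyg⟩ := List.mem_flatten.mp (hperm.symm.subset (by exact hy))
    by_cases hgh : g = g'
    · subst hgh
      have hone := (pvSetLenOne (g.map (·.2))).mp (hall g hg)
      exact hone.2 x.2 (List.mem_map.mpr ⟨x, hxg, rfl⟩) y.2 (List.mem_map.mpr ⟨y, hyg, rfl⟩)
    · exfalso
      have hsymm : Symmetric (fun g h : List (List String × String) =>
          ∀ x ∈ g, ∀ y ∈ h, x.1.take depth ≠ y.1.take depth) :=
        fun a b hab y hy x hx he => hab x hx y hy he.symm
      exact hpair.forall hsymm hg hg' hgh x hxg y hyg hxy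
  · intro hhom g hg
    apply (pvSetLenOne _).mpr
    refine ⟨by simpa [List.map_eq_nil_iff] using hne g hg, ?_⟩
    intro a ha b hb
    obtain ⟨xa, hxa, rfl⟩ := List.mem_map.mp ha
    obtain ⟨xb, hxb, rfl⟩ := List.mem_map.mp hb
    exact hhom xa (hperm.subset (List.mem_flatten.mpr ⟨g, hg, hxa⟩))
      xb (hperm.subset (List.mem_flatten.mpr ⟨g, hg, hxb⟩))
      (hwithin g hg xa hxa xb hxb)

theorem pvLenB (S : List (List String × String)) (depth : Nat)
    (groups : List (List (List String × String))) (h : pvInv depth S groups) :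
    groups.length = (PySem.Set.ofList (S.map (fun x => x.1.take depth))).length := by
  obtain ⟨hne, hwithin, hpair, hperm⟩ := h
  have hnd : (groups.map (fun g => (g.headD ([], "")).1.take depth)).Nodup := by
    rw [List.Nodup, List.pairwise_map]
    refine List.Pairwise.imp_of_mem ?_ hpair
    intro g g' hg hg' hrel
    exact hrel _ (pvHeadDMem g ([], "") (hne g hg)) _ (pvHeadDMem g' ([], "") (hne g' hg'))
  have hmem : ∀ r, r ∈ groups.map (fun g => (g.headD ([], "")).1.take depth)
      ↔ r ∈ PySem.Set.ofList (S.map (fun x => x.1.take depth)) := by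
    intro r
    rw [PySem.Set.mem_ofList]
    constructor
    · intro hr
      obtain ⟨g, hg, rfl⟩ := List.mem_map.mp hr
      have hhd := pvHeadDMem g ([], "") (hne g hg)
      exact List.mem_map.mpr ⟨_, hperm.subset (List.mem_flatten.mpr ⟨g, hg, hhd⟩), rfl⟩
    · intro hr
      obtain ⟨x, hx, rfl⟩ := List.mem_map.mp hr
      obtain ⟨g, hg, hxg⟩ := List.mem_flatten.mp (hperm.symm.subset (by exact hx))
      refine List.mem_map.mpr ⟨g, hg, ?_⟩
      exact hwithin g hg _ (pvHeadDMem g ([], "") (hne g hg)) x hxg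
  have hp : (groups.map (fun g => (g.headD ([], "")).1.take depth)).Perm
      (PySem.Set.ofList (S.map (fun x => x.1.take depth))) :=
    (List.perm_ext_iff_of_nodup hnd (PySem.Set.nodup_ofList _)).mpr hmem
  rw [← hp.length_eq, List.length_map]

theorem pvPermPartition {α K : Type} [BEq K] [LawfulBEq K] (key : α → K) :
    ∀ (ks : List K) (g : List α), ks.Nodup → (∀ x ∈ g, key x ∈ ks) →
      (ks.flatMap (fun k => g.filter (fun x => key x == k))).Perm g := by
  intro ks
  induction ks with
  | nil =>
    intro g _ hcov
    cases g with
    | nil => simp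
    | cons a t => exact absurd (hcov a List.mem_cons_self) (List.not_mem_nil)
  | cons k ks ih =>
    intro g hnd hcov
    rw [List.flatMap_cons]
    have hre : ks.flatMap (fun k' => g.filter (fun x => key x == k'))
        = ks.flatMap (fun k' => (g.filter (fun x => !(key x == k))).filter (fun x => key x == k')) := by
      refine List.flatMap_congr ?_
      intro k' hk'
      rw [List.filter_filter]
      refine (List.filter_congr ?_).symm
      intro x _
      cases hkx : (key x == k') with
      | true =>
        have hnk : key x ≠ k := by
          intro hh
          have hkk : k = k' := by rw [← hh, beq_iff_eq.mp hkx]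
          exact (List.nodup_cons.mp hnd).1 (hkk ▸ hk')
        simp [beq_eq_false_iff_ne.mpr hnk]
      | false => simp
    rw [hre]
    have hcov' : ∀ x ∈ g.filter (fun x => !(key x == k)), key x ∈ ks := by
      intro x hx
      have h1 := List.mem_filter.mp hx
      have h2 := hcov x h1.1
      rcases List.mem_cons.mp h2 with h | h
      · rw [h] at h1; simp at h1
      · exact h
    have := ih (g.filter (fun x => !(key x == k))) (List.nodup_cons.mp hnd).2 hcov'
    exact (List.Perm.append_left _ this).trans (List.filter_append_perm _ g)

theorem pvInv_split (S : List (List String × String)) (depth : Nat)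
    (groups : List (List (List String × String))) (h : pvInv depth S groups) :
    pvInv (depth + 1) S (pvSplit depth groups) := by
  obtain ⟨hne, hwithin, hpair, hperm⟩ := h
  rw [pvSplit_eq]
  have hmemF : ∀ (g : List (List String × String)),
      ∀ g' ∈ (PySem.Set.ofList (g.map (fun x => x.1[depth]?))).map
        (fun c => g.filter (fun x => x.1[depth]? == c)),
      ∃ c, c ∈ g.map (fun x => x.1[depth]?) ∧ g' = g.filter (fun x => x.1[depth]? == c) := by
    intro g g' hg'
    obtain ⟨c, hc, rfl⟩ := List.mem_map.mp hg'
    exact ⟨c, (PySem.Set.mem_ofList _ _).mp hc, rfl⟩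
  refine ⟨?_, ?_, ?_, ?_⟩
  · -- every new group is nonempty
    intro g' hg'
    obtain ⟨g, hg, hgF⟩ := List.mem_flatMap.mp hg'
    obtain ⟨c, hc, rfl⟩ := hmemF g g' hgF
    obtain ⟨x, hx, hxc⟩ := List.mem_map.mp hc
    exact List.ne_nil_of_mem (List.mem_filter.mpr ⟨hx, beq_iff_eq.mpr hxc⟩)
  · -- members of a new group share the (depth+1)-prefix
    intro g' hg' x hx y hy
    obtain ⟨g, hg, hgF⟩ := List.mem_flatMap.mp hg'
    obtain ⟨c, _, rfl⟩ := hmemF g g' hgF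
    have hxf := List.mem_filter.mp hx
    have hyf := List.mem_filter.mp hy
    exact (pvTakeSuccIff _ _ depth).mpr
      ⟨hwithin g hg x hxf.1 y hyf.1, (beq_iff_eq.mp hxf.2).trans (beq_iff_eq.mp hyf.2).symm⟩
  · -- distinct new groups have disjoint (depth+1)-prefixes
    rw [List.flatMap_def, List.pairwise_flatten]
    constructor
    · intro vs hvs
      obtain ⟨g, hg, rfl⟩ := List.mem_map.mp hvs
      rw [List.pairwise_map]
      have hnd := PySem.Set.nodup_ofList (g.map (fun x : List String × String => x.1[depth]?))
      refine List.Pairwise.imp_of_mem ?_ hnd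
      intro c c' _ _ hcc x hx y hy hxy
      have hxf := List.mem_filter.mp hx
      have hyf := List.mem_filter.mp hy
      have hkey := ((pvTakeSuccIff _ _ depth).mp hxy).2
      exact hcc ((beq_iff_eq.mp hxf.2).symm.trans (hkey.trans (beq_iff_eq.mp hyf.2)))
    · rw [List.pairwise_map]
      refine List.Pairwise.imp_of_mem ?_ hpair
      intro g g' hg hg' hrel a ha b hb x hx y hy hxy
      obtain ⟨c, _, rfl⟩ := hmemF g a ha
      obtain ⟨c', _, rfl⟩ := hmemF g' b hb
      exact hrel x (List.mem_filter.mp hx).1 y (List.mem_filter.mp hy).1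
        ((pvTakeSuccIff _ _ depth).mp hxy).1
  · -- the new groups still partition exactly the items of S
    have h1 : ((groups.flatMap (fun g => (PySem.Set.ofList (g.map (fun x => x.1[depth]?))).map
        (fun c => g.filter (fun x => x.1[depth]? == c)))).flatten)
        = groups.flatMap (fun g => ((PySem.Set.ofList (g.map (fun x => x.1[depth]?))).map
        (fun c => g.filter (fun x => x.1[depth]? == c))).flatten) := by
      rw [List.flatten_eq_flatMap, List.flatMap_assoc]
      simp only [← List.flatten_eq_flatMap]
    rw [h1]
    have h2 : ∀ g ∈ groups,
        (((PySem.Set.ofList (g.map (fun x => x.1[depth]?))).map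
          (fun c => g.filter (fun x => x.1[depth]? == c))).flatten).Perm g := by
      intro g _
      rw [← List.flatMap_def]
      exact pvPermPartition (fun x => x.1[depth]?) _ g
        (PySem.Set.nodup_ofList _)
        (fun x hx => (PySem.Set.mem_ofList _ _).mpr (List.mem_map.mpr ⟨x, hx, rfl⟩))
    refine List.Perm.trans ?_ hperm
    have h3 := List.Perm.flatMap_left groups h2
    refine List.Perm.trans h3 ?_
    have h4 : (groups.flatMap (fun a => a)) = groups.flatten := by
      simp only [List.flatten_eq_flatMap]
      rfl
    rw [h4]

theorem pvLoop_eq (items : List ((List (String × String)) × (List (String × Bool))))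
    (order : List String) :
    ∀ (n depth : Nat) (groups : List (List (List String × String))),
      pvInv depth (pvSeqs items order) groups →
      pvLoopB (List.range' depth n) groups = pvLoopA items order (List.range' depth n) := by
  intro n
  induction n with
  | zero => intro depth groups _; rfl
  | succ n ih =>
    intro depth groups hinv
    show pvLoopB (depth :: List.range' (depth + 1) n) groups
        = pvLoopA items order (depth :: List.range' (depth + 1) n)
    simp only [pvLoopB, pvLoopA]
    have hA := pvBucketsA_eq_fold items order depth
    have hcond : (groups.all (fun g => (PySem.Set.ofList (g.map (·.2))).length == 1))
        = ((pvBucketsA items order depth).values.all (fun labels => labels.length == 1)) := by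
      rw [hA]
      exact Bool.eq_iff_iff.mpr
        ((pvCondB_iff (pvSeqs items order) depth groups hinv).trans
          (pvCondA_iff (pvSeqs items order) depth).symm)
    rw [hcond]
    by_cases hc : ((pvBucketsA items order depth).values.all (fun labels => labels.length == 1)) = true
    · rw [if_pos hc, if_pos hc]
      have hlen := pvLenB (pvSeqs items order) depth groups hinv
      rw [hA, pvSizeA, ← hlen]
    · rw [if_neg hc, if_neg hc]
      exact ih (depth + 1) (pvSplit depth groups) (pvInv_split _ _ _ hinv)


-- ===== VERDICT (by name: the statement is the Claim_ definition above) =====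
theorem minimal_depth_for_block_spec : Claim_equal_minimal_depth_for_block := by
  intro items order _ _
  unfold Spec_minimal_depth_for_block
  unfold minimal_depth_for_block minimal_depth_for_block_alt
  have hinv : pvInv 0 (pvSeqs items order)
      (if (pvSeqs items order).isEmpty then [] else [pvSeqs items order]) := by
    by_cases hS : pvSeqs items order = []
    · rw [if_pos (by simp [hS])]
      exact ⟨by simp, by simp, by simp, by simp [hS]⟩
    · rw [if_neg (by simp [hS])]
      refine ⟨?_, ?_, ?_, ?_⟩
      · intro g hg; rw [List.mem_singleton.mp hg]; exact hS
      · intro g hg x _ y _; simp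
      · exact List.pairwise_singleton _ _
      · simp
  rw [List.range_eq_range']
  exact (pvLoop_eq items order 6 0 _ hinv).symm
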